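-- pv_equiv track=rewrite | github.com/marcuusmelo/radar_do_carro_data | general_car_functions.py | get_car_transmission
-- ===== SOURCE A (Python) =====
-- def get_car_transmission(car_model):
--     """ Get car transmission from model description """
--     transm_list = ['Aut', 'AUT', 'Mec', 'MEC']
--
--     transm_final = 'MEC'
--     found = False
--
--     for transm_element in transm_list:
--         if transm_element in car_model:
--             found = True
--             transm_final = transm_element[:3].upper()
--     #if found == False:
--     #    print 'Transmission Type Not Found', car_model
--
--     return transm_final
-- ===== SOURCE B (Python) =====
-- def get_car_transmission(car_model):
--     """ Get car transmission from model description """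
--     has_aut = ('Aut' in car_model) or ('AUT' in car_model)
--     has_mec = ('Mec' in car_model) or ('MEC' in car_model)
--     return 'AUT' if has_aut and not has_mec else 'MEC'
-- ===== Notes on version B (the rewrite author's own statement) =====
-- stated objective: simpler
-- what changed: Replaces the last-match-wins accumulator loop over the four transmission markers with two substring booleans (has_aut, has_mec) and one conditional expression that encodes the Mec-overrides-Aut order and the default.
import Mathlib
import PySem

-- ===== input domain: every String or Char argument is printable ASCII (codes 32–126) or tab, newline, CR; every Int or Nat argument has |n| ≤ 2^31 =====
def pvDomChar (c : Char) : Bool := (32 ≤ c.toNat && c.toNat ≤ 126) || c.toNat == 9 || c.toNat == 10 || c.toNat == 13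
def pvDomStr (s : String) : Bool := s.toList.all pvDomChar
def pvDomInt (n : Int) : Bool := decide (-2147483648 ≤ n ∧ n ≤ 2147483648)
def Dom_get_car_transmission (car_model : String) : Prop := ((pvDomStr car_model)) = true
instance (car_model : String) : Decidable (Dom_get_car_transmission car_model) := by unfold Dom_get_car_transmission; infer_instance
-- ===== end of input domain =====

-- ===== PORT A =====
-- one honest line: B replaces A's last-match-wins loop with two substring booleans and one conditional; objective: simpler.
-- Literal port of A: fold the list ['Aut','AUT','Mec','MEC'] with the (found, transm_final) accumulator.
def get_car_transmission (car_model : String) : String :=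
  let transm_list : List String := ["Aut", "AUT", "Mec", "MEC"]
  let st := transm_list.foldl (fun (acc : Bool × String) transm_element =>
      if PySem.Str.isIn transm_element car_model then
        (true, PySem.Str.upper (PySem.Str.slice transm_element none (some 3)))
      else acc) (false, "MEC")
  st.2

-- ===== PORT B =====
def get_car_transmission_alt (car_model : String) : String :=
  let has_aut := PySem.Str.isIn "Aut" car_model || PySem.Str.isIn "AUT" car_model
  let has_mec := PySem.Str.isIn "Mec" car_model || PySem.Str.isIn "MEC" car_model
  if has_aut && !has_mec then "AUT" else "MEC"

-- ===== PRECONDITION & SPEC =====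
def Spec_get_car_transmission (car_model : String) (out : String) : Prop := out = get_car_transmission_alt car_model
instance (car_model : String) (out : String) : Decidable (Spec_get_car_transmission car_model out) := by unfold Spec_get_car_transmission; infer_instance

-- ===== CLAIM (what is proved, stated in full; the proofs are below) =====
def Claim_equal_get_car_transmission : Prop := ∀ (car_model : String), Dom_get_car_transmission car_model → Spec_get_car_transmission car_model (get_car_transmission car_model)

-- ===== LEMMAS AND PROOFS =====

-- ===== VERDICT (by name: the statement is the Claim_ definition above) =====
theorem get_car_transmission_spec : Claim_equal_get_car_transmission := by
  intro m _
  unfold Spec_get_car_transmission get_car_transmission get_car_transmission_alt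
  cases h1 : PySem.Chars.isIn ['A', 'u', 't'] m.toList <;>
  cases h2 : PySem.Chars.isIn ['A', 'U', 'T'] m.toList <;>
  cases h3 : PySem.Chars.isIn ['M', 'e', 'c'] m.toList <;>
  cases h4 : PySem.Chars.isIn ['M', 'E', 'C'] m.toList <;>
    simp [List.foldl, h1, h2, h3, h4]
  all_goals decide
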